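-- pv_equiv track=rewrite | github.com/julightzhong10/-Prob_DB | lift.py | is_incluUCQ_transferable
-- ===== SOURCE A (Python) =====
-- def is_incluUCQ_transferable(q):
--     '''
--     check if the UCQ is transferable for Inclusion operation
--     args:
--         q
--     return:
--         boolean, True if transferable, False otherwise
--     '''
--     UCQ_Rs=[]
--     UCQ_Rs_sets=[]
--     first_con=False # is all operations of every groups not in common; if True, every groups not in common, otherwise False.
--     for i in range(len(q)):
--         CNF_Rs=set()
--         CNF_sets=set()
--         for j in range(len(q[i])):
--             CNF_Rs.add(q[i][j][0])
--             CNF_sets.add(q[i][j][0])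
--         UCQ_Rs.append(CNF_Rs)
--         UCQ_Rs_sets.append(CNF_sets)
--     for i in range(len(UCQ_Rs)-1):
--         if not (len(UCQ_Rs[i])==len(UCQ_Rs[i+1]) and len(UCQ_Rs[i].intersection(UCQ_Rs[i+1]))==len(UCQ_Rs[i])):
--             first_con=True
--             break
--     intersect_part=UCQ_Rs_sets[0]
--     for i in range(1,len(UCQ_Rs_sets)):
--         intersect_part=intersect_part.intersection(UCQ_Rs_sets[i])
--     second_con=(len(intersect_part)!=0) # is every groups has common opeartions; if True, has the common operator, otherwise False.
--     return first_con,second_con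
-- ===== SOURCE B (Python) =====
-- def is_incluUCQ_transferable(q):
--     groups = [{t[0] for t in g} for g in q]
--     base = groups[0]
--     first_con = any(g != base for g in groups)
--     second_con = any(all(x in g for g in groups) for x in base)
--     return first_con, second_con
-- ===== Notes on version B (the rewrite author's own statement) =====
-- stated objective: simpler
-- what changed: B compares each group's relation-symbol set directly (==) against the first group instead of A's adjacent-pair size-and-intersection-cardinality scan, and tests for a common symbol by membership search over the first group instead of A's iterated set-intersection fold.
import Mathlib
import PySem

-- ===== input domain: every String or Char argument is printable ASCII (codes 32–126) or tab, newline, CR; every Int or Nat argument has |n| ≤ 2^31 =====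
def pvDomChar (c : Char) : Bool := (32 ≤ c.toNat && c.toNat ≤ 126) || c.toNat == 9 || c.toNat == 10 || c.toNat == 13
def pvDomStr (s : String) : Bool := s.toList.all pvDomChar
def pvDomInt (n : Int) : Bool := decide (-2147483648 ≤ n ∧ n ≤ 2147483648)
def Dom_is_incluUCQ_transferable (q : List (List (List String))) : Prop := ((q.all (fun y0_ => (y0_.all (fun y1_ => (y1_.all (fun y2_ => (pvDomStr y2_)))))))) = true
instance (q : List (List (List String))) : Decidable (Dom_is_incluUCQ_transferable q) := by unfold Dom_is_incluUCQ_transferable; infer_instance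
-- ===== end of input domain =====

-- B replaces A's adjacent size-and-intersection-cardinality scan and iterated intersection fold by
-- direct set equality against the first group and a common-member search (objective: simpler).

-- ===== PORT A =====
-- A's 'for i in range(len(UCQ_Rs)-1): if not (...): first_con=True; break' as structural recursion
def pvFirstConLoop : List (PySem.Set String) → Bool
  | a :: b :: rest =>
      if !(PySem.Set.len a == PySem.Set.len b &&
           PySem.Set.len (PySem.Set.inter a b) == PySem.Set.len a) then true
      else pvFirstConLoop (b :: rest)
  | _ => false

-- q[i][j][0] is ported as 'headD ""': Python raises IndexError on an empty atom, excluded by Pre_;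
-- 'UCQ_Rs_sets[0]' is ported as 'headD Set.empty': Python raises IndexError on empty q, excluded by Pre_
def is_incluUCQ_transferable (q : List (List (List String))) : Bool × Bool :=
  let st := q.foldl (fun (acc : List (PySem.Set String) × List (PySem.Set String)) gi =>
      let cnf := gi.foldl (fun (p : PySem.Set String × PySem.Set String) t =>
          (PySem.Set.add p.1 (t.headD ""), PySem.Set.add p.2 (t.headD "")))
        (PySem.Set.empty, PySem.Set.empty)
      (acc.1 ++ [cnf.1], acc.2 ++ [cnf.2])) ([], [])
  let first_con := pvFirstConLoop st.1
  let intersect_part := st.2.tail.foldl (fun acc s => PySem.Set.inter acc s)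
      (st.2.headD PySem.Set.empty)
  (first_con, PySem.Set.len intersect_part != 0)

-- ===== PORT B =====
-- t[0] ported as 'headD ""', groups[0] as 'headD Set.empty' (IndexError inputs excluded by Pre_)
def is_incluUCQ_transferable_alt (q : List (List (List String))) : Bool × Bool :=
  let groups := q.map (fun g => PySem.Set.ofList (g.map (fun t => t.headD "")))
  let base := groups.headD PySem.Set.empty
  let first_con := groups.any (fun g => !(PySem.Set.equal g base))
  let second_con := base.any (fun x => groups.all (fun g => PySem.Set.contains g x))
  (first_con, second_con)

-- ===== PRECONDITION & SPEC =====
-- Pre_ excludes exactly the inputs where Python A raises IndexError: empty q (UCQ_Rs_sets[0])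
-- and any empty atom (q[i][j][0]); B raises there too.
def Pre_is_incluUCQ_transferable (q : List (List (List String))) : Prop :=
  q ≠ [] ∧ ∀ g ∈ q, ∀ t ∈ g, t ≠ []
instance (q : List (List (List String))) : Decidable (Pre_is_incluUCQ_transferable q) := by
  unfold Pre_is_incluUCQ_transferable; infer_instance
def pvWitness_is_incluUCQ_transferable : List (List (List String)) := [[["R", "x"]], [["R", "y"]]]

def Spec_is_incluUCQ_transferable (q : List (List (List String))) (out : Bool × Bool) : Prop := out = is_incluUCQ_transferable_alt q
instance (q : List (List (List String))) (out : Bool × Bool) : Decidable (Spec_is_incluUCQ_transferable q out) := by unfold Spec_is_incluUCQ_transferable; infer_instance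

-- ===== CLAIM (what is proved, stated in full; the proofs are below) =====
def Claim_equal_is_incluUCQ_transferable : Prop := ∀ (q : List (List (List String))), Dom_is_incluUCQ_transferable q → Pre_is_incluUCQ_transferable q → Spec_is_incluUCQ_transferable q (is_incluUCQ_transferable q)

-- ===== LEMMAS AND PROOFS =====

-- the per-group relation-symbol set both programs build
def pvGroupSet (g : List (List String)) : PySem.Set String :=
  PySem.Set.ofList (g.map (fun t => t.headD ""))

-- A's inner loop builds (pvGroupSet gi, pvGroupSet gi)
theorem pvInnerFold (gi : List (List String)) (s1 s2 : PySem.Set String) :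
    gi.foldl (fun (p : PySem.Set String × PySem.Set String) t =>
        (PySem.Set.add p.1 (t.headD ""), PySem.Set.add p.2 (t.headD ""))) (s1, s2)
      = (PySem.Set.update s1 (gi.map (fun t => t.headD "")),
         PySem.Set.update s2 (gi.map (fun t => t.headD ""))) := by
  induction gi generalizing s1 s2 with
  | nil => simp [PySem.Set.update]
  | cons t ts ih =>
      simp only [List.foldl_cons, ih, List.map_cons, PySem.Set.update_cons]

-- a fold appending the same element to both components, in closed form
theorem pvPairFold {α β : Type} (f : α → β) (l : List α) (l1 l2 : List β) :
    l.foldl (fun (acc : List β × List β) g => (acc.1 ++ [f g], acc.2 ++ [f g])) (l1, l2)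
      = (l1 ++ l.map f, l2 ++ l.map f) := by
  induction l generalizing l1 l2 with
  | nil => simp
  | cons g gs ih => simp [ih]

-- A's outer loop builds the list of group sets, twice
theorem pvOuterFold (q : List (List (List String)))
    (l1 l2 : List (PySem.Set String)) :
    q.foldl (fun (acc : List (PySem.Set String) × List (PySem.Set String)) gi =>
        let cnf := gi.foldl (fun (p : PySem.Set String × PySem.Set String) t =>
            (PySem.Set.add p.1 (t.headD ""), PySem.Set.add p.2 (t.headD "")))
          (PySem.Set.empty, PySem.Set.empty)
        (acc.1 ++ [cnf.1], acc.2 ++ [cnf.2])) (l1, l2)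
      = (l1 ++ q.map pvGroupSet, l2 ++ q.map pvGroupSet) := by
  simp only [pvInnerFold]
  have hfun : pvGroupSet = fun gi : List (List String) =>
      PySem.Set.update PySem.Set.empty (gi.map (fun t => t.headD "")) :=
    funext fun gi => (PySem.Set.update_empty _).symm
  rw [hfun]
  exact pvPairFold _ q l1 l2

-- A's adjacent test is set equality (for duplicate-free sets)
theorem pvCondEqEqual (a b : PySem.Set String) (ha : a.Nodup) (hb : b.Nodup) :
    (PySem.Set.len a == PySem.Set.len b &&
     PySem.Set.len (PySem.Set.inter a b) == PySem.Set.len a) = PySem.Set.equal a b := by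
  by_cases h : PySem.Set.equal a b = true
  · rw [h]
    have hmem := (PySem.Set.equal_iff a b).mp h
    have hperm : a.Perm b := (List.perm_ext_iff_of_nodup ha hb).mpr hmem
    have hlen : a.length = b.length := hperm.length_eq
    have hfilter : PySem.Set.inter a b = a := by
      unfold PySem.Set.inter
      apply List.filter_eq_self.mpr
      intro x hx
      exact (PySem.Set.contains_iff b x).mpr ((hmem x).mp hx)
    simp [PySem.Set.len, hlen, hfilter]
  · have h' : PySem.Set.equal a b = false := Bool.eq_false_iff.mpr h
    rw [h']
    apply Bool.eq_false_iff.mpr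
    intro hcontra
    apply h
    simp only [Bool.and_eq_true, beq_iff_eq, PySem.Set.len, Nat.cast_inj] at hcontra
    obtain ⟨hlen, hint⟩ := hcontra
    have hsub : ∀ x ∈ a, x ∈ b := by
      have : PySem.Set.inter a b = a := by
        unfold PySem.Set.inter at hint ⊢
        exact List.Sublist.eq_of_length List.filter_sublist hint
      intro x hx
      have hx' : x ∈ PySem.Set.inter a b := by rw [this]; exact hx
      rw [PySem.Set.mem_inter] at hx'
      exact hx'.2
    -- same cardinality + one inclusion + nodup ⇒ same members
    have hcard : a.toFinset = b.toFinset := by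
      apply Finset.eq_of_subset_of_card_le
      · intro x hx
        exact List.mem_toFinset.mpr (hsub x (List.mem_toFinset.mp hx))
      · rw [List.toFinset_card_of_nodup ha, List.toFinset_card_of_nodup hb, hlen]
    apply (PySem.Set.equal_iff a b).mpr
    intro x
    constructor
    · exact hsub x
    · intro hx
      have : x ∈ a.toFinset := hcard ▸ List.mem_toFinset.mpr hx
      exact List.mem_toFinset.mp this
  
-- Set.equal is symmetric
theorem pvEqualSymm (a b : PySem.Set String) : PySem.Set.equal a b = PySem.Set.equal b a := by
  rw [Bool.eq_iff_iff, PySem.Set.equal_iff, PySem.Set.equal_iff]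
  exact ⟨fun h x => (h x).symm, fun h x => (h x).symm⟩

-- A's break-loop over adjacent pairs = "some group differs from the first"
theorem pvFirstConChar (s0 : PySem.Set String) (rest : List (PySem.Set String))
    (h0 : s0.Nodup) (hr : ∀ s ∈ rest, List.Nodup s) :
    pvFirstConLoop (s0 :: rest) = rest.any (fun g => !(PySem.Set.equal g s0)) := by
  induction rest generalizing s0 with
  | nil => simp [pvFirstConLoop]
  | cons b rs ih =>
      have hb : b.Nodup := hr b (by simp)
      have hrs : ∀ s ∈ rs, List.Nodup s := fun s hs => hr s (by simp [hs])
      rw [pvFirstConLoop, pvCondEqEqual s0 b h0 hb]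
      by_cases h : PySem.Set.equal s0 b = true
      · rw [h, if_neg (by simp)]
        rw [ih b hb hrs]
        have hmem := (PySem.Set.equal_iff s0 b).mp h
        have heqb : ∀ g, PySem.Set.equal g b = PySem.Set.equal g s0 := by
          intro g
          rw [Bool.eq_iff_iff, PySem.Set.equal_iff, PySem.Set.equal_iff]
          exact ⟨fun hg x => (hg x).trans (hmem x).symm,
                 fun hg x => (hg x).trans (hmem x)⟩
        simp only [List.any_cons, pvEqualSymm b s0, h, Bool.not_true, Bool.false_or, heqb]
      · rw [Bool.not_eq_true] at h
        rw [h]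
        simp [pvEqualSymm b s0, h]

-- membership in A's iterated intersection
theorem pvMemFoldInter (rest : List (PySem.Set String)) (acc : PySem.Set String) (x : String) :
    x ∈ rest.foldl (fun acc s => PySem.Set.inter acc s) acc ↔ x ∈ acc ∧ ∀ s ∈ rest, x ∈ s := by
  induction rest generalizing acc with
  | nil => simp
  | cons b rs ih =>
      simp only [List.foldl_cons, ih, PySem.Set.mem_inter, List.mem_cons]
      constructor
      · rintro ⟨⟨hx, hb⟩, hrs⟩
        exact ⟨hx, fun s hs => hs.elim (fun h => h ▸ hb) (hrs s)⟩
      · rintro ⟨hx, hall⟩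
        exact ⟨⟨hx, hall b (Or.inl rfl)⟩, fun s hs => hall s (Or.inr hs)⟩

-- nonemptiness of the iterated intersection = existence of a common symbol
theorem pvSecondConChar (s0 : PySem.Set String) (rest : List (PySem.Set String)) :
    (PySem.Set.len (rest.foldl (fun acc s => PySem.Set.inter acc s) s0) != 0)
      = s0.any (fun x => (s0 :: rest).all (fun g => PySem.Set.contains g x)) := by
  rw [Bool.eq_iff_iff]
  simp only [bne_iff_ne, ne_eq, PySem.Set.len, Nat.cast_eq_zero, List.length_eq_zero_iff,
    List.any_eq_true, List.all_eq_true]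
  constructor
  · intro h
    obtain ⟨x, hx⟩ := List.exists_mem_of_ne_nil _ h
    obtain ⟨hx0, hall⟩ := (pvMemFoldInter rest s0 x).mp hx
    refine ⟨x, hx0, fun g hg => ?_⟩
    rcases List.mem_cons.mp hg with h | h
    · exact (PySem.Set.contains_iff g x).mpr (h ▸ hx0)
    · exact (PySem.Set.contains_iff g x).mpr (hall g h)
  · rintro ⟨x, hx0, hall⟩
    intro hnil
    have : x ∈ rest.foldl (fun acc s => PySem.Set.inter acc s) s0 :=
      (pvMemFoldInter rest s0 x).mpr
        ⟨hx0, fun s hs => (PySem.Set.contains_iff s x).mp (hall s (List.mem_cons_of_mem _ hs))⟩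
    rw [hnil] at this
    exact absurd this (List.not_mem_nil)

-- ===== VERDICT (by name: the statement is the Claim_ definition above) =====
theorem is_incluUCQ_transferable_spec : Claim_equal_is_incluUCQ_transferable := by
  intro q _ hpre
  obtain ⟨hne, _⟩ := hpre
  unfold Spec_is_incluUCQ_transferable is_incluUCQ_transferable is_incluUCQ_transferable_alt
  simp only [pvOuterFold, List.nil_append]
  obtain ⟨g0, qs, rfl⟩ := List.exists_cons_of_ne_nil hne
  simp only [List.map_cons, List.headD_cons, List.tail_cons]
  have hnodup : ∀ s ∈ qs.map pvGroupSet, List.Nodup s := by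
    intro s hs
    obtain ⟨g, _, rfl⟩ := List.mem_map.mp hs
    exact PySem.Set.nodup_ofList _
  rw [pvFirstConChar (pvGroupSet g0) (qs.map pvGroupSet) (PySem.Set.nodup_ofList _) hnodup,
    pvSecondConChar (pvGroupSet g0) (qs.map pvGroupSet)]
  simp [pvGroupSet, Function.comp_def]
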